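-- pv_equiv track=rewrite | github.com/nn-dma/generate-verification-report | src/script/render_design_specifications.py | extract_design_specification_tags
-- ===== SOURCE A (Python) =====
-- def extract_design_specification_tags(lines):
--     tags = []
--     readTags = False
--     for i, line in enumerate(lines):
--         if 'tags:' in line:
--             # tags:
--             readTags = True
--         if readTags:
--             #   - service_now_integration
--             if '- ' in line:
--                 tags.append(line.split('- ')[1].strip())
--             if '---' in line: # This marks the end of a tag section, so do not process the rest of the file.
--                 # ---
--                 break
--     return tags
-- ===== SOURCE B (Python) =====
-- def extract_design_specification_tags(lines):
--     start = next((i for i, l in enumerate(lines) if 'tags:' in l), None)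
--     if start is None:
--         return []
--     tail = lines[start:]
--     end = next((i for i, l in enumerate(tail) if '---' in l), None)
--     section = tail if end is None else tail[:end + 1]
--     return [l.split('- ')[1].strip() for l in section if '- ' in l]
-- ===== Notes on version B (the rewrite author's own statement) =====
-- stated objective: simpler
-- what changed: Replaces the stateful flag-and-break single loop by staged passes with no loop state at all: locate the first 'tags:' line, locate the first '---' line after it to pre-delimit the section as a slice, then extract the tags with one filter/map comprehension over that slice.
import Mathlib
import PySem

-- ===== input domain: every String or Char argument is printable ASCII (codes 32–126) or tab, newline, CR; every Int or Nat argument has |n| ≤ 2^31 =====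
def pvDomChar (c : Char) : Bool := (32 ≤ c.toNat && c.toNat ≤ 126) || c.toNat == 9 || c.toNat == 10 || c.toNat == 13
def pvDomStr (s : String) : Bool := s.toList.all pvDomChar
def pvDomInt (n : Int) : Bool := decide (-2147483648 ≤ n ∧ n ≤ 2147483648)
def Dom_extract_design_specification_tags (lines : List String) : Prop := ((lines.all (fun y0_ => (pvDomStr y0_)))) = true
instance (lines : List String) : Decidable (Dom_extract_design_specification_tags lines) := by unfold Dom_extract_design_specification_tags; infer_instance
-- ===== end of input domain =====

-- B: same extraction without loop state — locate 'tags:', pre-delimit the section at the first '---', one filter/map over the slice (simpler).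
-- ===== PORT A =====
-- A's loop: state = (tags, readTags); break on '---' once reading
def pvATag (line : String) : String :=
  PySem.Str.strip ((PySem.List.pyGet? ((PySem.Str.split? line "- ").getD []) 1).getD "")

def pvALoop (rest : List String) (tags : List String) (readTags : Bool) : List String :=
  match rest with
  | [] => tags
  | line :: rest =>
      let readTags := if PySem.Str.isIn "tags:" line then true else readTags
      if readTags then
        let tags := if PySem.Str.isIn "- " line then tags ++ [pvATag line] else tags
        if PySem.Str.isIn "---" line then tags else pvALoop rest tags readTags
      else pvALoop rest tags readTags

def extract_design_specification_tags (lines : List String) : List String :=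
  pvALoop lines [] false

-- ===== PORT B =====
def pvBTag (line : String) : String :=
  PySem.Str.strip ((PySem.List.pyGet? ((PySem.Str.split? line "- ").getD []) 1).getD "")

-- section = tail if no '---' in tail else tail[:end+1]
def pvBSection (tail : List String) : List String :=
  match tail.findIdx? (fun l => PySem.Str.isIn "---" l) with
  | none => tail
  | some e => tail.take (e + 1)

def extract_design_specification_tags_alt (lines : List String) : List String :=
  match lines.findIdx? (fun l => PySem.Str.isIn "tags:" l) with
  | none => []
  | some start =>
      ((pvBSection (lines.drop start)).filter (fun l => PySem.Str.isIn "- " l)).map pvBTag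

-- ===== PRECONDITION & SPEC =====
def Spec_extract_design_specification_tags (lines : List String) (out : List String) : Prop := out = extract_design_specification_tags_alt lines
instance (lines : List String) (out : List String) : Decidable (Spec_extract_design_specification_tags lines out) := by unfold Spec_extract_design_specification_tags; infer_instance

-- ===== CLAIM (what is proved, stated in full; the proofs are below) =====
def Claim_equal_extract_design_specification_tags : Prop := ∀ (lines : List String), Dom_extract_design_specification_tags lines → Spec_extract_design_specification_tags lines (extract_design_specification_tags lines)

-- ===== LEMMAS AND PROOFS =====

lemma pvBSection_cons_neg (line : String) (rest : List String)
    (hd : ¬ PySem.Chars.isIn ['-', '-', '-'] line.toList = true) :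
    pvBSection (line :: rest) = line :: pvBSection rest := by
  unfold pvBSection
  rw [List.findIdx?_cons]
  cases hf : rest.findIdx? (fun l => PySem.Str.isIn "---" l) <;>
    simp_all [List.take_succ_cons]

lemma pvBSection_cons_pos (line : String) (rest : List String)
    (hd : PySem.Chars.isIn ['-', '-', '-'] line.toList = true) :
    pvBSection (line :: rest) = [line] := by
  unfold pvBSection
  rw [List.findIdx?_cons]
  simp_all

lemma pvALoop_true (rest : List String) (tags : List String) :
    pvALoop rest tags true =
      tags ++ ((pvBSection rest).filter (fun l => PySem.Str.isIn "- " l)).map pvBTag := by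
  induction rest generalizing tags with
  | nil => simp [pvALoop, pvBSection]
  | cons line rest ih =>
      by_cases hd : PySem.Chars.isIn ['-', '-', '-'] line.toList = true
      · rw [pvBSection_cons_pos line rest hd]
        by_cases hm : PySem.Chars.isIn ['-', ' '] line.toList = true <;>
          simp [pvALoop, hd, hm, pvATag, pvBTag]
      · rw [pvBSection_cons_neg line rest hd]
        by_cases hm : PySem.Chars.isIn ['-', ' '] line.toList = true <;>
          simp [pvALoop, hd, hm, pvATag, pvBTag, ih]

lemma pvALoop_false (lines : List String) :
    pvALoop lines [] false = extract_design_specification_tags_alt lines := by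
  unfold extract_design_specification_tags_alt
  induction lines with
  | nil => rfl
  | cons line rest ih =>
      rw [List.findIdx?_cons]
      by_cases h : PySem.Chars.isIn ['t','a','g','s',':'] line.toList = true
      · by_cases hd : PySem.Chars.isIn ['-', '-', '-'] line.toList = true <;>
          by_cases hm : PySem.Chars.isIn ['-', ' '] line.toList = true <;>
            simp [pvALoop, h, hd, hm, pvALoop_true, pvBSection_cons_pos,
              pvBSection_cons_neg, pvATag, pvBTag]
      · have hs : pvALoop (line :: rest) [] false = pvALoop rest [] false := by
          simp [pvALoop, h]
        rw [hs, ih]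
        cases hf : rest.findIdx? (fun l => PySem.Str.isIn "tags:" l) <;>
          simp_all [List.drop_succ_cons]

-- ===== VERDICT (by name: the statement is the Claim_ definition above) =====
theorem extract_design_specification_tags_spec : Claim_equal_extract_design_specification_tags := by
  intro lines _
  unfold Spec_extract_design_specification_tags extract_design_specification_tags
  exact pvALoop_false lines
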